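-- pv_equiv track=rewrite | github.com/Nidenai/test_flask_tic_tac_toe | game_logic/resolve_win.py | diagonal_elements
-- ===== SOURCE A (Python) =====
-- def diagonal_elements(rows):
--     wins = []
--     diagonal_element = 1
--     count = 0
--     adding = 0
--     diagonal = []
--     while count < rows:
--         diagonal.append(diagonal_element + adding)
--         adding += (rows + 1)
--         count += 1
--     wins.append(diagonal)
--     reversal_diagonal_element = rows
--     count = 0
--     adding = 0
--     reverse_diagonal = []
--     while count < rows:
--         reverse_diagonal.append(reversal_diagonal_element + adding)
--         adding += (rows - 1)
--         count += 1
--     wins.append(reverse_diagonal)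
--     return wins
-- ===== SOURCE B (Python) =====
-- def diagonal_elements(rows):
--     main_diagonal = [i * rows + i + 1 for i in range(rows)]
--     anti_diagonal = [i * rows + (rows - 1 - i) + 1 for i in range(rows)]
--     return [main_diagonal, anti_diagonal]
-- ===== Notes on version B (the rewrite author's own statement) =====
-- stated objective: simpler
-- what changed: B computes each diagonal entry by the closed-form cell formula i*rows+j+1 at its (row, column) position via comprehensions, instead of A's two while-loops maintaining count/adding stride accumulators.
import Mathlib
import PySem

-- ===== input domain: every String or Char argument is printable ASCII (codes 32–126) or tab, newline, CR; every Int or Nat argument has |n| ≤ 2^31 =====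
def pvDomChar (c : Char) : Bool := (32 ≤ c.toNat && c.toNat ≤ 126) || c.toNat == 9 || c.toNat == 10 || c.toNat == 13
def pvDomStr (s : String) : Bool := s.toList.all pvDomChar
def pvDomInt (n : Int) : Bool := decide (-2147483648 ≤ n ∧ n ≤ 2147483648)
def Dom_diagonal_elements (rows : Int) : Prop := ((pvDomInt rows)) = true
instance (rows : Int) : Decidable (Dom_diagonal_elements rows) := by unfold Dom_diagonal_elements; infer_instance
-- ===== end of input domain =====

-- B replaces A's two stride-accumulator while-loops by closed-form per-cell formulas
-- (cell (i,j) holds i*rows+j+1; take j = i and j = rows-1-i), objective: simpler.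

-- ===== PORT A =====
-- A's two while-loops have the same shape (append start+adding; adding += step; count += 1);
-- this helper is that loop, used once per diagonal with its own start value and stride.
def diagLoop (rows start step count adding : Int) (acc : List Int) : List Int :=
  if _h : count < rows then
    diagLoop rows start step (count + 1) (adding + step) (acc ++ [start + adding])
  else acc
termination_by (rows - count).toNat
decreasing_by omega

def diagonal_elements (rows : Int) : List (List Int) :=
  let diagonal := diagLoop rows 1 (rows + 1) 0 0 []
  let reverse_diagonal := diagLoop rows rows (rows - 1) 0 0 []
  [diagonal, reverse_diagonal]

-- ===== PORT B =====
def diagonal_elements_alt (rows : Int) : List (List Int) :=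
  let main_diagonal := (PySem.List.pyRange 0 rows 1).map (fun i => i * rows + i + 1)
  let anti_diagonal := (PySem.List.pyRange 0 rows 1).map (fun i => i * rows + (rows - 1 - i) + 1)
  [main_diagonal, anti_diagonal]

-- ===== PRECONDITION & SPEC =====
def Spec_diagonal_elements (rows : Int) (out : List (List Int)) : Prop := out = diagonal_elements_alt rows
instance (rows : Int) (out : List (List Int)) : Decidable (Spec_diagonal_elements rows out) := by unfold Spec_diagonal_elements; infer_instance

-- ===== CLAIM (what is proved, stated in full; the proofs are below) =====
def Claim_equal_diagonal_elements : Prop := ∀ (rows : Int), Dom_diagonal_elements rows → Spec_diagonal_elements rows (diagonal_elements rows)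

-- ===== LEMMAS AND PROOFS =====

-- A's loop appends start + adding and bumps adding by step each turn: it produces
-- the arithmetic progression start + adding + k*step for k = 0 .. (rows-count)-1.
theorem diagLoop_closed (rows start step : Int) :
    ∀ (n : Nat) (count adding : Int) (acc : List Int), (rows - count).toNat = n →
      diagLoop rows start step count adding acc
        = acc ++ (List.range n).map (fun (k : Nat) => start + adding + (k : Int) * step) := by
  intro n
  induction n with
  | zero =>
    intro count adding acc h
    rw [diagLoop]
    simp only [List.range_zero, List.map_nil, List.append_nil]
    rw [dif_neg (by omega)]
  | succ m ih =>
    intro count adding acc h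
    rw [diagLoop, dif_pos (by omega)]
    rw [ih (count + 1) (adding + step) _ (by omega)]
    rw [List.range_succ_eq_map]
    simp only [List.map_cons, List.map_map, List.append_assoc, List.singleton_append]
    simp only [Nat.cast_zero, zero_mul, add_zero]
    refine congrArg (acc ++ ·) ?_
    refine congrArg (List.cons _) ?_
    apply List.map_congr_left
    intro k _
    simp only [Function.comp_apply]
    push_cast
    ring

-- B's comprehensions evaluate to the same two arithmetic progressions.
theorem alt_closed (rows : Int) :
    diagonal_elements_alt rows =
      [(List.range rows.toNat).map (fun (k : Nat) => 1 + 0 + (k : Int) * (rows + 1)),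
       (List.range rows.toNat).map (fun (k : Nat) => rows + 0 + (k : Int) * (rows - 1))] := by
  unfold diagonal_elements_alt
  rw [PySem.List.pyRange_one]
  simp only [Int.sub_zero, List.map_map, zero_add]
  congr 1
  · apply List.map_congr_left
    intro k _
    simp only [Function.comp_apply]
    ring
  · congr 1
    apply List.map_congr_left
    intro k _
    simp only [Function.comp_apply]
    ring

-- ===== VERDICT (by name: the statement is the Claim_ definition above) =====
theorem diagonal_elements_spec : Claim_equal_diagonal_elements := by
  intro rows _
  unfold Spec_diagonal_elements diagonal_elements
  rw [diagLoop_closed rows 1 (rows + 1) rows.toNat 0 0 [] (by omega),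
      diagLoop_closed rows rows (rows - 1) rows.toNat 0 0 [] (by omega),
      alt_closed]
  simp
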